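-- pv_equiv track=rewrite | github.com/abhinavjain2937/practice-python-assignments | q1.py | req
-- ===== SOURCE A (Python) =====
-- def req (num):
--     x= []
--     n = len(num)
--     for i in range(n):
--         for j in range(i+1):
--             for k in range(j+1):
--                 if i!= j and j!=k and i!=k and num[i]+num[j]+num[k] == 0:
--                     l1 = []
--                     if num[i] and num[j] and num[k] not in x:
--
--                         l1.append(num[i])
--                         l1.append(num[j])
--                         l1.append(num[k])
--                         x.append(l1)
--     return x
-- ===== SOURCE B (Python) =====
-- def req(num):
--     out = []
--     for i in range(len(num)):
--         left = {}  # value -> count among indices < j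
--         for j in range(i):
--             t = -(num[i] + num[j])
--             for _ in range(left.get(t, 0)):
--                 out.append([num[i], num[j], t])
--             left[num[j]] = left.get(num[j], 0) + 1
--     return out
-- ===== Notes on version B (the rewrite author's own statement) =====
-- stated objective: faster
-- what changed: Replaces the cubic triple loop (and its precedence-slipped dedup test) by a per-i running value->count dictionary over prefixes, emitting each pair's triple count times, O(n^2 + output) instead of O(n^3).
-- intended difference: On inputs containing an index-ordered zero-sum triple k<j<i with num[i]==0 or num[j]==0, A's test 'num[i] and num[j] and num[k] not in x' (an and-precedence slip in a dedup attempt; 'num[k] not in x' is always true) silently drops exactly those triples, so A omits them; B returns every zero-sum triple, which is the intended value. — e.g. on req([1, -1, 0]): A returns [], B returns [[0, -1, 1]]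
import Mathlib
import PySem

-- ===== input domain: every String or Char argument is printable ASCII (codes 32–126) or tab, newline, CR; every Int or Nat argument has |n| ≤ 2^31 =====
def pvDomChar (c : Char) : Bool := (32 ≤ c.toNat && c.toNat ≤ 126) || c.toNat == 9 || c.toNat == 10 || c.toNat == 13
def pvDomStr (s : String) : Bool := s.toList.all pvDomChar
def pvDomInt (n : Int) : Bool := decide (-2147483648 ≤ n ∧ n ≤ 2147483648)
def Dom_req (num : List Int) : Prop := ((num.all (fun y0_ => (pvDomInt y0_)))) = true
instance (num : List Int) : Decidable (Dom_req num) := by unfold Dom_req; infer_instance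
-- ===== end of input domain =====

-- B replaces A's cubic triple loop by a per-i running value→count dictionary over prefixes
-- (each pair (j,i) emits its zero-sum triple count times); B also returns the zero-sum
-- triples whose i- or j-element is 0, which A's precedence-slipped test drops (see D_req).
-- ===== PORT A =====
-- A: cubic scan over k ≤ j ≤ i; Python's `num[k] not in x` compares an Int with lists and
-- is always True, so it is ported as an absent conjunct (exact).
def req (num : List Int) : List (List Int) :=
  (PySem.List.pyRange 0 (PySem.List.len num) 1).foldl (fun x i =>
    (PySem.List.pyRange 0 (i + 1) 1).foldl (fun x j =>
      (PySem.List.pyRange 0 (j + 1) 1).foldl (fun x k =>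
        if i ≠ j ∧ j ≠ k ∧ i ≠ k ∧
            PySem.List.pyGetD num i 0 + PySem.List.pyGetD num j 0 + PySem.List.pyGetD num k 0 = 0 then
          if PySem.List.pyGetD num i 0 ≠ 0 ∧ PySem.List.pyGetD num j 0 ≠ 0 then
            x ++ [[PySem.List.pyGetD num i 0, PySem.List.pyGetD num j 0, PySem.List.pyGetD num k 0]]
          else x
        else x) x) x) []

-- ===== PORT B =====
-- B: for each i a running dictionary counts values among indices < j; the pair (j, i)
-- emits its triple `left.get(t, 0)` times.
def req_alt (num : List Int) : List (List Int) :=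
  (PySem.List.pyRange 0 (PySem.List.len num) 1).foldl (fun out i =>
    ((PySem.List.pyRange 0 i 1).foldl
      (fun (st : List (List Int) × PySem.Dict Int Int) j =>
        let t := -(PySem.List.pyGetD num i 0 + PySem.List.pyGetD num j 0)
        ((PySem.List.pyRange 0 (st.2.getD t 0) 1).foldl
            (fun o _ => o ++ [[PySem.List.pyGetD num i 0, PySem.List.pyGetD num j 0, t]]) st.1,
         st.2.insert (PySem.List.pyGetD num j 0) (st.2.getD (PySem.List.pyGetD num j 0) 0 + 1)))
      (out, PySem.Dict.empty)).1) []

-- ===== PRECONDITION & SPEC =====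
-- On inputs containing an index-ordered zero-sum triple k<j<i with num[i]==0 or num[j]==0,
-- A's test `num[i] and num[j] and num[k] not in x` (an and-precedence slip in a dedup
-- attempt; `num[k] not in x` is always true) silently drops exactly those triples, so A
-- omits them; B returns every zero-sum triple, which is the intended value.
def D_req (num : List Int) : Prop :=
  ∃ i < num.length, ∃ j < i, ∃ k < j,
    num.getD i 0 + num.getD j 0 + num.getD k 0 = 0 ∧ (num.getD i 0 = 0 ∨ num.getD j 0 = 0)
instance (num : List Int) : Decidable (D_req num) := by unfold D_req; infer_instance
def Spec_req (num : List Int) (out : List (List Int)) : Prop := ¬ D_req num → out = req_alt num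
instance (num : List Int) (out : List (List Int)) : Decidable (Spec_req num out) := by unfold Spec_req; infer_instance
def pvDiffWitness_req : List Int := [1, -1, 0]
def pvDiffWitnessOut_req : (List (List Int)) × (List (List Int)) := ([], [[0, -1, 1]])

-- ===== CLAIM (what is proved, stated in full; the proofs are below) =====
def Claim_unchanged_req : Prop := ∀ (num : List Int), Dom_req num → Spec_req num (req num)
def Claim_changed_req : Prop := Dom_req (pvDiffWitness_req) ∧ D_req (pvDiffWitness_req) ∧ req (pvDiffWitness_req) = pvDiffWitnessOut_req.1 ∧ req_alt (pvDiffWitness_req) = pvDiffWitnessOut_req.2 ∧ pvDiffWitnessOut_req.1 ≠ pvDiffWitnessOut_req.2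
def Claim_exact_req : Prop := ∀ (num : List Int), Dom_req num → D_req num → req num ≠ req_alt num

-- ===== LEMMAS AND PROOFS =====
-- proof-only helpers: pvG num k = num[k]; pvNA / pvNB are the common normal forms of the
-- two loop nests; pvDct num m is B's dictionary after the first m indices.
def pvG (num : List Int) (k : Nat) : Int := num.getD k 0

def pvCond (num : List Int) (i j k : Nat) : Bool :=
  decide (pvG num i + pvG num j + pvG num k = 0 ∧ (pvG num i ≠ 0 ∧ pvG num j ≠ 0))

def pvNA (num : List Int) : List (List Int) :=
  (List.range num.length).flatMap (fun i =>
    (List.range i).flatMap (fun j =>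
      ((List.range j).filter (pvCond num i j)).map (fun k => [pvG num i, pvG num j, pvG num k])))

def pvCnt (num : List Int) (i j : Nat) : Nat :=
  (List.range j).countP (fun k => pvG num k == -(pvG num i + pvG num j))

def pvNB (num : List Int) : List (List Int) :=
  (List.range num.length).flatMap (fun i =>
    (List.range i).flatMap (fun j =>
      List.replicate (pvCnt num i j) [pvG num i, pvG num j, -(pvG num i + pvG num j)]))

def pvDct (num : List Int) (m : Nat) : PySem.Dict Int Int :=
  (List.range m).foldl (fun d k => d.insert (pvG num k) (d.getD (pvG num k) 0 + 1)) PySem.Dict.empty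

theorem pvG_def (num : List Int) (k : Nat) : pvG num k = num.getD k 0 := rfl

-- innermost k-loop of A, for j = kj < ki = i
theorem pv_inner_k (num : List Int) (ki kj : Nat) (hj : kj < ki) (x : List (List Int)) :
    (PySem.List.pyRange 0 ((kj : Int) + 1) 1).foldl (fun x k =>
        if (ki : Int) ≠ (kj : Int) ∧ (kj : Int) ≠ k ∧ (ki : Int) ≠ k ∧
            PySem.List.pyGetD num (ki : Int) 0 + PySem.List.pyGetD num (kj : Int) 0 + PySem.List.pyGetD num k 0 = 0 then
          if PySem.List.pyGetD num (ki : Int) 0 ≠ 0 ∧ PySem.List.pyGetD num (kj : Int) 0 ≠ 0 then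
            x ++ [[PySem.List.pyGetD num (ki : Int) 0, PySem.List.pyGetD num (kj : Int) 0, PySem.List.pyGetD num k 0]]
          else x
        else x) x
    = x ++ ((List.range kj).filter (pvCond num ki kj)).map
        (fun k => [pvG num ki, pvG num kj, pvG num k]) := by
  have h1 : ((kj : Int) + 1) = ((kj + 1 : Nat) : Int) := by push_cast; ring
  rw [h1, PySem.List.pyRange_zero_nat, List.foldl_map]
  have hc : ∀ (acc : List (List Int)), ∀ k ∈ List.range (kj + 1),
      (if (ki : Int) ≠ (kj : Int) ∧ (kj : Int) ≠ (k : Int) ∧ (ki : Int) ≠ (k : Int) ∧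
            PySem.List.pyGetD num (ki : Int) 0 + PySem.List.pyGetD num (kj : Int) 0 + PySem.List.pyGetD num (k : Int) 0 = 0 then
          if PySem.List.pyGetD num (ki : Int) 0 ≠ 0 ∧ PySem.List.pyGetD num (kj : Int) 0 ≠ 0 then
            acc ++ [[PySem.List.pyGetD num (ki : Int) 0, PySem.List.pyGetD num (kj : Int) 0, PySem.List.pyGetD num (k : Int) 0]]
          else acc
        else acc)
      = (if k < kj ∧ (pvG num ki + pvG num kj + pvG num k = 0 ∧ (pvG num ki ≠ 0 ∧ pvG num kj ≠ 0)) then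
          acc ++ [[pvG num ki, pvG num kj, pvG num k]] else acc) := by
    intro acc k hk
    simp only [List.mem_range] at hk
    simp only [PySem.List.pyGetD_natCast, pvG_def]
    by_cases hlt : k < kj
    · have c1 : (ki : Int) ≠ (kj : Int) := by omega
      have c2 : (kj : Int) ≠ (k : Int) := by omega
      have c3 : (ki : Int) ≠ (k : Int) := by omega
      by_cases hs : num[ki]?.getD 0 + num[kj]?.getD 0 + num[k]?.getD 0 = 0
      · by_cases hz : num[ki]?.getD 0 ≠ 0 ∧ num[kj]?.getD 0 ≠ 0
        · simp [c1, c2, c3, hs, hz, hlt]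
        · simp [c1, c2, c3, hs, hz, hlt]
      · simp [c1, c2, c3, hs, hlt]
    · have hk2 : k = kj := by omega
      subst hk2
      simp
  rw [PySem.List.foldl_congr_mem _ _ _ _ hc, PySem.List.foldl_append_ite]
  congr 1
  rw [List.range_succ, List.filter_append]
  have h2 : List.filter (fun k => decide (k < kj ∧ (pvG num ki + pvG num kj + pvG num k = 0 ∧ (pvG num ki ≠ 0 ∧ pvG num kj ≠ 0)))) [kj] = [] := by
    simp
  rw [h2, List.append_nil]
  congr 1
  apply List.filter_congr
  intro k hk
  simp only [List.mem_range] at hk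
  simp [pvCond, pvG_def, hk]

-- middle j-loop of A, for i = ki
theorem pv_mid (num : List Int) (ki : Nat) (x : List (List Int)) :
    (PySem.List.pyRange 0 ((ki : Int) + 1) 1).foldl (fun x j =>
      (PySem.List.pyRange 0 (j + 1) 1).foldl (fun x k =>
        if (ki : Int) ≠ j ∧ j ≠ k ∧ (ki : Int) ≠ k ∧
            PySem.List.pyGetD num (ki : Int) 0 + PySem.List.pyGetD num j 0 + PySem.List.pyGetD num k 0 = 0 then
          if PySem.List.pyGetD num (ki : Int) 0 ≠ 0 ∧ PySem.List.pyGetD num j 0 ≠ 0 then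
            x ++ [[PySem.List.pyGetD num (ki : Int) 0, PySem.List.pyGetD num j 0, PySem.List.pyGetD num k 0]]
          else x
        else x) x) x
    = x ++ (List.range ki).flatMap (fun kj =>
        ((List.range kj).filter (pvCond num ki kj)).map
          (fun k => [pvG num ki, pvG num kj, pvG num k])) := by
  have h1 : ((ki : Int) + 1) = ((ki + 1 : Nat) : Int) := by push_cast; ring
  rw [h1, PySem.List.pyRange_zero_nat, List.foldl_map]
  have hc : ∀ (acc : List (List Int)), ∀ kj ∈ List.range (ki + 1),
      (PySem.List.pyRange 0 ((kj : Int) + 1) 1).foldl (fun x k =>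
        if (ki : Int) ≠ (kj : Int) ∧ (kj : Int) ≠ k ∧ (ki : Int) ≠ k ∧
            PySem.List.pyGetD num (ki : Int) 0 + PySem.List.pyGetD num (kj : Int) 0 + PySem.List.pyGetD num k 0 = 0 then
          if PySem.List.pyGetD num (ki : Int) 0 ≠ 0 ∧ PySem.List.pyGetD num (kj : Int) 0 ≠ 0 then
            x ++ [[PySem.List.pyGetD num (ki : Int) 0, PySem.List.pyGetD num (kj : Int) 0, PySem.List.pyGetD num k 0]]
          else x
        else x) acc
      = acc ++ (if kj < ki then
          ((List.range kj).filter (pvCond num ki kj)).map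
            (fun k => [pvG num ki, pvG num kj, pvG num k]) else []) := by
    intro acc kj hkj
    simp only [List.mem_range] at hkj
    by_cases h : kj < ki
    · rw [pv_inner_k num ki kj h acc, if_pos h]
    · have hij : kj = ki := by omega
      subst hij
      have hbody : (fun (x : List (List Int)) (k : Int) =>
          if (kj : Int) ≠ (kj : Int) ∧ (kj : Int) ≠ k ∧ (kj : Int) ≠ k ∧
              PySem.List.pyGetD num (kj : Int) 0 + PySem.List.pyGetD num (kj : Int) 0 + PySem.List.pyGetD num k 0 = 0 then
            if PySem.List.pyGetD num (kj : Int) 0 ≠ 0 ∧ PySem.List.pyGetD num (kj : Int) 0 ≠ 0 then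
              x ++ [[PySem.List.pyGetD num (kj : Int) 0, PySem.List.pyGetD num (kj : Int) 0, PySem.List.pyGetD num k 0]]
            else x
          else x) = (fun x _ => x) := by
        funext x k; simp
      rw [hbody, PySem.List.foldl_ignore, if_neg h, List.append_nil]
  rw [PySem.List.foldl_congr_mem _ _ _ _ hc, PySem.List.foldl_append_eq_flatMap]
  congr 1
  rw [List.range_succ, List.flatMap_append]
  have h4 : (if ki < ki then
      ((List.range ki).filter (pvCond num ki ki)).map (fun k => [pvG num ki, pvG num ki, pvG num k])
    else []) = ([] : List (List Int)) := by simp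
  simp only [List.flatMap_cons, List.flatMap_nil, h4, List.append_nil]
  exact List.flatMap_congr (fun kj hkj => if_pos (List.mem_range.mp hkj))

theorem req_eq_NA (num : List Int) : req num = pvNA num := by
  unfold req
  rw [PySem.List.len_eq, PySem.List.pyRange_zero_nat, List.foldl_map]
  have hc : ∀ (acc : List (List Int)), ∀ ki ∈ List.range num.length,
      (PySem.List.pyRange 0 ((ki : Int) + 1) 1).foldl (fun x j =>
        (PySem.List.pyRange 0 (j + 1) 1).foldl (fun x k =>
          if (ki : Int) ≠ j ∧ j ≠ k ∧ (ki : Int) ≠ k ∧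
              PySem.List.pyGetD num (ki : Int) 0 + PySem.List.pyGetD num j 0 + PySem.List.pyGetD num k 0 = 0 then
            if PySem.List.pyGetD num (ki : Int) 0 ≠ 0 ∧ PySem.List.pyGetD num j 0 ≠ 0 then
              x ++ [[PySem.List.pyGetD num (ki : Int) 0, PySem.List.pyGetD num j 0, PySem.List.pyGetD num k 0]]
            else x
          else x) x) acc
      = acc ++ (List.range ki).flatMap (fun kj =>
          ((List.range kj).filter (pvCond num ki kj)).map
            (fun k => [pvG num ki, pvG num kj, pvG num k])) := by
    intro acc ki _
    exact pv_mid num ki acc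
  rw [PySem.List.foldl_congr_mem _ _ _ _ hc, PySem.List.foldl_append_eq_flatMap]
  simp [pvNA]

theorem pvDct_succ (num : List Int) (m : Nat) :
    pvDct num (m + 1) = (pvDct num m).insert (pvG num m) ((pvDct num m).getD (pvG num m) 0 + 1) := by
  rw [pvDct, pvDct, List.range_succ, List.foldl_append, List.foldl_cons, List.foldl_nil]

theorem pvDct_getD (num : List Int) (m : Nat) (v : Int) :
    (pvDct num m).getD v 0 = (((List.range m).countP (fun k => pvG num k == v) : Nat) : Int) := by
  have h0 : pvDct num m = ((List.range m).map (pvG num)).foldl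
      (fun d x => d.insert x (d.getD x 0 + 1)) PySem.Dict.empty := by
    rw [pvDct, List.foldl_map]
  rw [h0, PySem.Dict.getD_foldl_insert_add_one, PySem.Dict.getD_empty, zero_add,
    List.count_eq_countP, List.countP_map]
  rfl

theorem B_inner (num : List Int) (ki : Nat) : ∀ (m : Nat) (out : List (List Int)),
    (List.range m).foldl (fun (st : List (List Int) × PySem.Dict Int Int) (kj : Nat) =>
        let t := -(PySem.List.pyGetD num (ki : Int) 0 + PySem.List.pyGetD num (kj : Int) 0)
        ((PySem.List.pyRange 0 (st.2.getD t 0) 1).foldl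
            (fun o _ => o ++ [[PySem.List.pyGetD num (ki : Int) 0, PySem.List.pyGetD num (kj : Int) 0, t]]) st.1,
         st.2.insert (PySem.List.pyGetD num (kj : Int) 0) (st.2.getD (PySem.List.pyGetD num (kj : Int) 0) 0 + 1)))
      (out, PySem.Dict.empty)
    = (out ++ (List.range m).flatMap (fun kj =>
          List.replicate (pvCnt num ki kj) [pvG num ki, pvG num kj, -(pvG num ki + pvG num kj)]),
       pvDct num m) := by
  intro m
  induction m with
  | zero =>
    intro out
    simp [pvDct]
  | succ m ih =>
    intro out
    rw [List.range_succ, List.foldl_append, ih out, List.foldl_cons, List.foldl_nil]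
    simp only [PySem.List.pyGetD_natCast, List.flatMap_append, List.flatMap_cons,
      List.flatMap_nil, List.append_nil, ← List.append_assoc]
    refine Prod.ext ?_ ?_
    · show (PySem.List.pyRange 0 ((pvDct num m).getD (-(pvG num ki + pvG num m)) 0) 1).foldl
          (fun o _ => o ++ [[pvG num ki, pvG num m, -(pvG num ki + pvG num m)]])
          (out ++ (List.range m).flatMap (fun kj =>
            List.replicate (pvCnt num ki kj) [pvG num ki, pvG num kj, -(pvG num ki + pvG num kj)]))
        = out ++ (List.range m).flatMap (fun kj =>
            List.replicate (pvCnt num ki kj) [pvG num ki, pvG num kj, -(pvG num ki + pvG num kj)])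
          ++ List.replicate (pvCnt num ki m) [pvG num ki, pvG num m, -(pvG num ki + pvG num m)]
      rw [pvDct_getD num m (-(pvG num ki + pvG num m)),
        PySem.List.foldl_append_singleton_eq_map, List.map_const']
      have hlen : (PySem.List.pyRange 0 (((pvCnt num ki m : Nat) : Int)) 1).length
          = pvCnt num ki m := by
        simp [PySem.List.length_pyRange_one]
      rw [show (List.range m).countP (fun k => pvG num k == -(pvG num ki + pvG num m))
          = pvCnt num ki m from rfl, hlen]
    · show (pvDct num m).insert (pvG num m) ((pvDct num m).getD (pvG num m) 0 + 1) = pvDct num (m + 1)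
      rw [pvDct_succ]

theorem req_alt_eq_NB (num : List Int) : req_alt num = pvNB num := by
  unfold req_alt
  rw [PySem.List.len_eq, PySem.List.pyRange_zero_nat, List.foldl_map]
  have hc : ∀ (acc : List (List Int)), ∀ ki ∈ List.range num.length,
      ((PySem.List.pyRange 0 ((ki : Int)) 1).foldl
        (fun (st : List (List Int) × PySem.Dict Int Int) j =>
          let t := -(PySem.List.pyGetD num (ki : Int) 0 + PySem.List.pyGetD num j 0)
          ((PySem.List.pyRange 0 (st.2.getD t 0) 1).foldl
              (fun o _ => o ++ [[PySem.List.pyGetD num (ki : Int) 0, PySem.List.pyGetD num j 0, t]]) st.1,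
           st.2.insert (PySem.List.pyGetD num j 0) (st.2.getD (PySem.List.pyGetD num j 0) 0 + 1)))
        (acc, PySem.Dict.empty)).1
      = acc ++ (List.range ki).flatMap (fun kj =>
          List.replicate (pvCnt num ki kj) [pvG num ki, pvG num kj, -(pvG num ki + pvG num kj)]) := by
    intro acc ki _
    rw [PySem.List.pyRange_zero_nat, List.foldl_map, B_inner num ki ki acc]
  rw [PySem.List.foldl_congr_mem _ _ _ _ hc, PySem.List.foldl_append_eq_flatMap]
  simp [pvNB]

theorem NA_eq_NB (num : List Int) (h : ¬ D_req num) : pvNA num = pvNB num := by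
  have h' : ∀ i < num.length, ∀ j < i, ∀ k < j,
      num.getD i 0 + num.getD j 0 + num.getD k 0 = 0 → num.getD i 0 ≠ 0 ∧ num.getD j 0 ≠ 0 := by
    intro i hi j hj k hk hs
    constructor
    · intro h0; exact h ⟨i, hi, j, hj, k, hk, hs, Or.inl h0⟩
    · intro h0; exact h ⟨i, hi, j, hj, k, hk, hs, Or.inr h0⟩
  unfold pvNA pvNB
  apply List.flatMap_congr
  intro i hi
  apply List.flatMap_congr
  intro j hj
  simp only [List.mem_range] at hi hj
  have hfil : (List.range j).filter (pvCond num i j) =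
      (List.range j).filter (fun k => pvG num k == -(pvG num i + pvG num j)) := by
    apply List.filter_congr
    intro k hk
    simp only [List.mem_range] at hk
    by_cases hs : pvG num i + pvG num j + pvG num k = 0
    · have hnz := h' i hi j hj k hk hs
      have hcnd : pvCond num i j k = true := by
        simp only [pvCond, decide_eq_true_eq]
        exact ⟨hs, hnz.1, hnz.2⟩
      have hb : (pvG num k == -(pvG num i + pvG num j)) = true := by
        simp only [beq_iff_eq]
        omega
      rw [hcnd, hb]
    · have hcnd : pvCond num i j k = false := by
        simp only [pvCond, decide_eq_false_iff_not]
        rintro ⟨hs', -⟩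
        exact hs hs'
      have hb : (pvG num k == -(pvG num i + pvG num j)) = false := by
        simp only [beq_eq_false_iff_ne, ne_eq]
        intro hh
        apply hs
        rw [hh]; ring
      rw [hcnd, hb]
  rw [hfil]
  have hconst : ∀ k ∈ (List.range j).filter (fun k => pvG num k == -(pvG num i + pvG num j)),
      [pvG num i, pvG num j, pvG num k] = [pvG num i, pvG num j, -(pvG num i + pvG num j)] := by
    intro k hk
    have hb := (List.mem_filter.mp hk).2
    simp only [beq_iff_eq] at hb
    rw [hb]
  rw [List.map_congr_left hconst, List.map_const', ← List.countP_eq_length_filter]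
  rfl

theorem lengths_lt (num : List Int) (hD : D_req num) : (pvNA num).length < (pvNB num).length := by
  obtain ⟨i0, hi0, j0, hj0, k0, hk0, hs0, hz0⟩ := hD
  have hmono : ∀ (i j : Nat) (l : List Nat),
      l.countP (pvCond num i j) ≤ l.countP (fun k => pvG num k == -(pvG num i + pvG num j)) := by
    intro i j l
    apply List.countP_mono_left
    intro k _ hc
    simp only [pvCond, decide_eq_true_eq] at hc
    simp only [beq_iff_eq, pvG_def] at hc ⊢
    omega
  unfold pvNA pvNB
  rw [List.length_flatMap, List.length_flatMap]
  apply List.sum_lt_sum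
  · intro i _
    rw [List.length_flatMap, List.length_flatMap]
    apply List.sum_le_sum
    intro j _
    simp only [List.length_map, List.length_replicate, ← List.countP_eq_length_filter]
    exact hmono i j (List.range j)
  · refine ⟨i0, List.mem_range.mpr hi0, ?_⟩
    rw [List.length_flatMap, List.length_flatMap]
    apply List.sum_lt_sum
    · intro j _
      simp only [List.length_map, List.length_replicate, ← List.countP_eq_length_filter]
      exact hmono i0 j (List.range j)
    · refine ⟨j0, List.mem_range.mpr hj0, ?_⟩
      simp only [List.length_map, List.length_replicate, ← List.countP_eq_length_filter]
      show (List.range j0).countP (pvCond num i0 j0) < pvCnt num i0 j0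
      obtain ⟨s, t2, hsplit⟩ := List.append_of_mem (List.mem_range.mpr hk0)
      unfold pvCnt
      rw [hsplit, List.countP_append, List.countP_append, List.countP_cons, List.countP_cons]
      have hc0 : pvCond num i0 j0 k0 = false := by
        simp only [pvCond, decide_eq_false_iff_not, pvG_def]
        rintro ⟨-, hni, hnj⟩
        rcases hz0 with h | h
        · exact hni h
        · exact hnj h
      have hb0 : (pvG num k0 == -(pvG num i0 + pvG num j0)) = true := by
        simp only [beq_iff_eq, pvG_def]
        omega
      rw [hc0, hb0]
      have m1 := hmono i0 j0 s
      have m2 := hmono i0 j0 t2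
      simp only [Bool.false_eq_true, if_true, if_false]
      omega

-- ===== VERDICT (by name: the statement is the Claim_ definition above) =====
theorem req_spec : Claim_unchanged_req := by
  intro num _ hD
  rw [req_eq_NA, req_alt_eq_NB]
  exact NA_eq_NB num hD

theorem req_changed : Claim_changed_req := by unfold Claim_changed_req; decide

theorem req_tight : Claim_exact_req := by
  intro num _ hD
  have hlt := lengths_lt num hD
  rw [req_eq_NA, req_alt_eq_NB]
  intro he
  rw [he] at hlt
  exact lt_irrefl _ hlt
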